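-- pv_equiv track=rewrite | github.com/qxxxb/ctf | 2020/pbctf/queensarah2/guess.py | check_odd_cycles
-- ===== SOURCE A (Python) =====
-- def check_odd_cycles(cycles):
--     clens = {}
--     for c in cycles:
--         clen = len(c)
--         if clen in clens:
--             clens[clen] += 1
--         else:
--             clens[clen] = 1
--
--     for clen in clens:
--         n = clens[clen]
--         if n % 2 == 1 and n > 1:
--             return False
--
--     return True
-- ===== SOURCE B (Python) =====
-- from itertools import groupby
--
-- def check_odd_cycles(cycles):
--     lengths = sorted(len(c) for c in cycles)
--     for _, grp in groupby(lengths):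
--         run = sum(1 for _ in grp)
--         if run % 2 == 1 and run > 1:
--             return False
--     return True
-- ===== Notes on version B (the rewrite author's own statement) =====
-- stated objective: alternative
-- what changed: Replaces A's hash-table count of cycle lengths followed by a scan over the table with a sort of the lengths and a single groupby pass over runs of equal lengths.
import Mathlib
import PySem

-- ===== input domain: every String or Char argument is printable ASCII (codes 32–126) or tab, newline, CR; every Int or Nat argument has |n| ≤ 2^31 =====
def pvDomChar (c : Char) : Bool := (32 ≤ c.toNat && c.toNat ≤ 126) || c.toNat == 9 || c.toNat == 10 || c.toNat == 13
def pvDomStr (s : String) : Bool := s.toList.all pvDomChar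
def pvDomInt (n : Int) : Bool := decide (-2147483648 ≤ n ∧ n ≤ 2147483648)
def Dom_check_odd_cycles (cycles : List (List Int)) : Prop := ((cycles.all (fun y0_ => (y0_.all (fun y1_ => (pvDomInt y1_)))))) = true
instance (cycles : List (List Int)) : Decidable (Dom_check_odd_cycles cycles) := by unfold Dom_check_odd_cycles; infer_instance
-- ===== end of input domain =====

-- B replaces A's hash-table count-then-scan by sorting the cycle lengths once and scanning runs
-- of equal lengths (itertools.groupby); objective: alternative decomposition, same result.

-- ===== PORT A =====
def check_odd_cycles (cycles : List (List Int)) : Bool :=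
  let clens := cycles.foldl (fun d c =>
      let clen : Int := c.length
      if d.contains clen then d.modify clen 0 (· + 1) else d.insert clen 1)
    PySem.Dict.empty
  -- 'for clen in clens: … return False / return True' = all keys pass the check
  clens.keys.all (fun clen =>
    let n := clens.getD clen 0
    !(PySem.Int.mod n 2 == 1 && decide (n > 1)))

-- ===== PORT B =====
-- one step of 'for _, grp in groupby(lengths)': the run of the head, then the rest
def pvRuns : List Int → Bool
  | [] => true
  | x :: xs =>
    let run : Int := 1 + ((xs.takeWhile (fun y => y == x)).length : Int)
    if PySem.Int.mod run 2 == 1 && decide (run > 1) then false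
    else pvRuns (xs.dropWhile (fun y => y == x))
termination_by l => l.length
decreasing_by simpa using Nat.lt_succ_of_le (List.length_dropWhile_le _ _)

def check_odd_cycles_alt (cycles : List (List Int)) : Bool :=
  pvRuns (PySem.List.sorted (cycles.map (fun c => (c.length : Int))) (fun x => x) false)

-- ===== PRECONDITION & SPEC =====
def Spec_check_odd_cycles (cycles : List (List Int)) (out : Bool) : Prop := out = check_odd_cycles_alt cycles
instance (cycles : List (List Int)) (out : Bool) : Decidable (Spec_check_odd_cycles cycles out) := by unfold Spec_check_odd_cycles; infer_instance

-- ===== CLAIM (what is proved, stated in full; the proofs are below) =====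
def Claim_equal_check_odd_cycles : Prop := ∀ (cycles : List (List Int)), Dom_check_odd_cycles cycles → Spec_check_odd_cycles cycles (check_odd_cycles cycles)

-- ===== LEMMAS AND PROOFS =====

-- the parity check both programs apply to a multiplicity
def pvBad (n : Int) : Bool := PySem.Int.mod n 2 == 1 && decide (n > 1)

lemma pvStep_eq (d : PySem.Dict Int Int) (k : Int) :
    (if d.contains k then d.modify k 0 (· + 1) else d.insert k 1) = d.modify k 0 (· + 1) := by
  by_cases h : d.contains k
  · simp [h]
  · have hg : d.getD k 0 = 0 := by
      simp only [PySem.Dict.contains, List.any_eq_true, not_exists, not_and,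
        Bool.not_eq_true] at h
      have hfind : List.find? (fun p => p.1 == k) d.items = none :=
        List.find?_eq_none.mpr (fun p hp => by simp [h p hp])
      simp [PySem.Dict.getD, PySem.Dict.get?, hfind]
    simp [h, PySem.Dict.modify, hg]

lemma pvDictA_eq_counter (cycles : List (List Int)) :
    cycles.foldl (fun d c =>
      let clen : Int := c.length
      if d.contains clen then d.modify clen 0 (· + 1) else d.insert clen 1)
      PySem.Dict.empty
    = PySem.Dict.counter (cycles.map (fun c => (c.length : Int))) := by
  rw [PySem.Dict.counter_eq_foldl, List.foldl_map]
  congr 1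
  funext d c
  exact pvStep_eq d c.length

lemma pvA_iff (cycles : List (List Int)) :
    check_odd_cycles cycles = true ↔
      ∀ v ∈ cycles.map (fun c => (c.length : Int)),
        pvBad ((((cycles.map (fun c => (c.length : Int))).count v : Nat) : Int) ) = false := by
  unfold check_odd_cycles
  rw [pvDictA_eq_counter]
  simp only [PySem.Dict.keys_counter, PySem.Dict.getD_counter, List.all_eq_true]
  constructor
  · intro h v hv
    have := h v ((PySem.Set.mem_ofList _ _).mpr hv)
    simpa only [pvBad, Bool.not_eq_true'] using this
  · intro h v hv
    have := h v ((PySem.Set.mem_ofList _ _).mp hv)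
    simpa only [pvBad, Bool.not_eq_true'] using this

lemma pvRuns_iff : ∀ (n : Nat) (s : List Int), s.length ≤ n → s.Pairwise (· ≤ ·) →
    (pvRuns s = true ↔ ∀ v ∈ s, pvBad (((s.count v : Nat) : Int)) = false) := by
  intro n
  induction n with
  | zero =>
    intro s hlen _
    have : s = [] := List.length_eq_zero_iff.mp (Nat.le_zero.mp hlen)
    subst this; simp [pvRuns]
  | succ n ih =>
    intro s hlen hp
    match s with
    | [] => simp [pvRuns]
    | x :: xs =>
      have hxle : ∀ y ∈ xs, x ≤ y := fun y hy => List.rel_of_pairwise_cons hp hy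
      have hpxs : xs.Pairwise (· ≤ ·) := hp.of_cons
      set q : Int → Bool := fun y => y == x with hq
      have htw : ∀ y ∈ xs.takeWhile q, y = x := by
        intro y hy
        have := List.mem_takeWhile_imp hy
        simpa [hq] using this
      have hdwlt : ∀ y ∈ xs.dropWhile q, x < y := by
        have hpd : (xs.dropWhile q).Pairwise (· ≤ ·) := hpxs.sublist (List.dropWhile_sublist q)
        cases hdw : xs.dropWhile q with
        | nil => simp
        | cons z d' =>
          have hz : q z = false := by
            have := List.head?_dropWhile_not q xs
            rw [hdw] at this
            simpa using this
          have hzx : x < z := by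
            have hzmem : z ∈ xs := (List.dropWhile_sublist q).subset (hdw ▸ List.mem_cons_self)
            have := hxle z hzmem
            have hne : z ≠ x := by simpa [hq] using hz
            omega
          intro y hy
          rcases List.mem_cons.mp hy with rfl | hy'
          · exact hzx
          · have : z ≤ y := List.rel_of_pairwise_cons (hdw ▸ hpd) hy'
            omega
      have hsplit : xs.takeWhile q ++ xs.dropWhile q = xs := List.takeWhile_append_dropWhile
      have hctw : (xs.takeWhile q).count x = (xs.takeWhile q).length := by
        rw [List.count_eq_length]
        intro b hb
        simpa using (htw b hb).symm
      have hcdw0 : (xs.dropWhile q).count x = 0 := by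
        rw [List.count_eq_zero]
        intro h
        exact absurd (hdwlt x h) (lt_irrefl x)
      have hcx : (x :: xs).count x = 1 + (xs.takeWhile q).length := by
        have : xs.count x = (xs.takeWhile q).count x + (xs.dropWhile q).count x := by
          rw [← List.count_append, hsplit]
        simp [List.count_cons_self, this, hctw, hcdw0]
        omega
      have hcv : ∀ v ∈ xs.dropWhile q, (x :: xs).count v = (xs.dropWhile q).count v := by
        intro v hv
        have hvne : v ≠ x := by have := hdwlt v hv; omega
        have hctw0 : (xs.takeWhile q).count v = 0 := by
          rw [List.count_eq_zero]
          intro h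
          exact hvne (htw v h)
        have : xs.count v = (xs.takeWhile q).count v + (xs.dropWhile q).count v := by
          rw [← List.count_append, hsplit]
        simp [List.count_cons, this, hctw0]
        exact fun h => hvne h.symm
      have hmem : ∀ v, v ∈ x :: xs ↔ v = x ∨ v ∈ xs.dropWhile q := by
        intro v
        constructor
        · intro hv
          rcases List.mem_cons.mp hv with rfl | hv'
          · exact Or.inl rfl
          · rw [← hsplit] at hv'
            rcases List.mem_append.mp hv' with h | h
            · exact Or.inl (htw v h)
            · exact Or.inr h
        · rintro (rfl | hv)
          · exact List.mem_cons_self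
          · exact List.mem_cons_of_mem _ ((List.dropWhile_sublist q).subset hv)
      have hlen' : (xs.dropWhile q).length ≤ n := by
        have := List.length_dropWhile_le q xs
        simp at hlen
        omega
      have hrun : (((( (x :: xs).count x : Nat)) : Int)) = 1 + ((xs.takeWhile q).length : Int) := by
        rw [hcx]; push_cast; ring
      have hpvr : pvRuns (x :: xs) =
          (if pvBad (1 + ((xs.takeWhile q).length : Int)) = true then false
           else pvRuns (xs.dropWhile q)) := by
        rw [pvRuns]
        rfl
      by_cases hbad : pvBad (1 + ((xs.takeWhile q).length : Int)) = true
      · rw [hpvr, if_pos hbad]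
        constructor
        · intro h; exact absurd h (by simp)
        · intro h
          have := h x List.mem_cons_self
          rw [hrun] at this
          rw [hbad] at this
          exact absurd this (by simp)
      · rw [hpvr, if_neg hbad]
        rw [ih (xs.dropWhile q) hlen' (hpxs.sublist (List.dropWhile_sublist q))]
        constructor
        · intro h v hv
          rcases (hmem v).mp hv with rfl | hv'
          · rw [hrun]; simpa using hbad
          · rw [hcv v hv']
            exact h v hv'
        · intro h v hv
          rw [← hcv v hv]
          exact h v ((hmem v).mpr (Or.inr hv))

lemma pvB_iff (cycles : List (List Int)) :
    check_odd_cycles_alt cycles = true ↔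
      ∀ v ∈ cycles.map (fun c => (c.length : Int)),
        pvBad ((((cycles.map (fun c => (c.length : Int))).count v : Nat) : Int)) = false := by
  unfold check_odd_cycles_alt
  set L := cycles.map (fun c => (c.length : Int)) with hL
  have hperm : (PySem.List.sorted L (fun x => x) false).Perm L :=
    PySem.List.sorted_perm L (fun x => x) false
  have hpw : (PySem.List.sorted L (fun x => x) false).Pairwise (· ≤ ·) := by
    simpa using PySem.List.sorted_pairwise L (fun x => x)
  rw [pvRuns_iff (PySem.List.sorted L (fun x => x) false).length _ le_rfl hpw]
  constructor
  · intro h v hv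
    have := h v (hperm.mem_iff.mpr hv)
    rwa [hperm.count_eq] at this
  · intro h v hv
    rw [hperm.count_eq]
    exact h v (hperm.mem_iff.mp hv)

-- ===== VERDICT (by name: the statement is the Claim_ definition above) =====
theorem check_odd_cycles_spec : Claim_equal_check_odd_cycles := by
  intro cycles _
  unfold Spec_check_odd_cycles
  rw [Bool.eq_iff_iff, pvA_iff, pvB_iff]
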